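-- pv_equiv track=rewrite | github.com/BalkrishanSingh/AdventOfCode2021 | Day-10/Problem-2.py | completion_score
-- ===== SOURCE A (Python) =====
-- def completion_score(completion):
--     SYNTAX_SCORE_VALUES = {')': 1,
--                 ']': 2,
--                 '}': 3,
--                 '>': 4}
--     completion_score = 0
--     for char in completion:
--         completion_score = completion_score * 5 + SYNTAX_SCORE_VALUES[char]
--     return completion_score
-- ===== SOURCE B (Python) =====
-- def completion_score(completion):
--     SYNTAX_SCORE_VALUES = {')': 1,
--                 ']': 2,
--                 '}': 3,
--                 '>': 4}
--     total = 0
--     multiplier = 1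
--     for char in reversed(completion):
--         total += SYNTAX_SCORE_VALUES[char] * multiplier
--         multiplier *= 5
--     return total
-- ===== Notes on version B (the rewrite author's own statement) =====
-- stated objective: alternative
-- what changed: Replaces Horner-style forward accumulation (acc*5+digit) with a reverse traversal maintaining a running power-of-5 multiplier and summing digit*multiplier.
import Mathlib
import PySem

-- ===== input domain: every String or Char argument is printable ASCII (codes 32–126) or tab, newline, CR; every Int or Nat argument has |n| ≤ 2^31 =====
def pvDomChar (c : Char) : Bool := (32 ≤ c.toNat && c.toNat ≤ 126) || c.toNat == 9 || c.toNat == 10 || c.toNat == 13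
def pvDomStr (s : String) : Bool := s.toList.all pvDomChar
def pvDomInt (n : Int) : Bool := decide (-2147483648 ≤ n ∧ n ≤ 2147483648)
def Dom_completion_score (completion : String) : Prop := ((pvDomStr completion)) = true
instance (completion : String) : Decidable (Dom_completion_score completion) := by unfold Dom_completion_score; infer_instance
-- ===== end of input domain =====

-- B computes the same base-5 value by a reverse traversal with a running power-of-5
-- multiplier instead of A's Horner accumulation; same cost, different decomposition.

-- ===== PORT A =====
-- the literal dict {')':1, ']':2, '}':3, '>':4}
def pvScoreDict : PySem.Dict Char Int :=
  PySem.Dict.ofList [(')', 1), (']', 2), ('}', 3), ('>', 4)]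

-- dict lookup SYNTAX_SCORE_VALUES[char]; Python raises KeyError when missing —
-- exactly those inputs are excluded by Pre_completion_score (getD 0 is never reached inside Pre_)
def completion_score (completion : String) : Int :=
  completion.toList.foldl (fun acc c => acc * 5 + pvScoreDict.getD c 0) 0

-- ===== PORT B =====
def completion_score_alt (completion : String) : Int :=
  (completion.toList.reverse.foldl
    (fun (st : Int × Int) c => (st.1 + pvScoreDict.getD c 0 * st.2, st.2 * 5)) (0, 1)).1

-- ===== PRECONDITION & SPEC =====
-- Pre_ excludes exactly the inputs containing a character that is not one of the four closing characters,
-- on which both Pythons raise KeyError.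
def Pre_completion_score (completion : String) : Prop :=
  (completion.toList.all (fun c => c == ')' || c == ']' || c == '}' || c == '>')) = true
instance (completion : String) : Decidable (Pre_completion_score completion) := by
  unfold Pre_completion_score; infer_instance

def pvWitness_completion_score : String := "}}]])})]"

def Spec_completion_score (completion : String) (out : Int) : Prop :=
  out = completion_score_alt completion
instance (completion : String) (out : Int) : Decidable (Spec_completion_score completion out) := by
  unfold Spec_completion_score; infer_instance

-- ===== CLAIM (what is proved, stated in full; the proofs are below) =====
def Claim_equal_completion_score : Prop :=
  ∀ (completion : String), Dom_completion_score completion →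
    Pre_completion_score completion →
    Spec_completion_score completion (completion_score completion)

-- ===== LEMMAS AND PROOFS =====

-- Horner foldl with arbitrary start accumulator splits off the start times 5^length.
theorem pv_horner_split (l : List Char) (a : Int) :
    l.foldl (fun acc c => acc * 5 + pvScoreDict.getD c 0) a
      = a * 5 ^ l.length + l.foldl (fun acc c => acc * 5 + pvScoreDict.getD c 0) 0 := by
  induction l generalizing a with
  | nil => simp
  | cons c t ih =>
    simp only [List.foldl_cons, List.length_cons]
    rw [ih (a * 5 + pvScoreDict.getD c 0), ih (0 * 5 + pvScoreDict.getD c 0)]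
    ring

-- B's pair fold (over the reversed list, i.e. a foldr) computes (Horner value, 5^length).
theorem pv_pair_fold (l : List Char) :
    l.reverse.foldl
      (fun (st : Int × Int) c => (st.1 + pvScoreDict.getD c 0 * st.2, st.2 * 5)) (0, 1)
      = (l.foldl (fun acc c => acc * 5 + pvScoreDict.getD c 0) 0, (5 : Int) ^ l.length) := by
  rw [List.foldl_reverse]
  induction l with
  | nil => simp
  | cons c t ih =>
    simp only [List.foldr_cons, ih, List.foldl_cons, List.length_cons]
    rw [pv_horner_split t (0 * 5 + pvScoreDict.getD c 0)]
    refine Prod.ext ?_ ?_ <;> simp <;> ring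

-- ===== VERDICT (by name: the statement is the Claim_ definition above) =====
theorem completion_score_spec : Claim_equal_completion_score := by
  intro completion _ _
  unfold Spec_completion_score completion_score completion_score_alt
  rw [pv_pair_fold]
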